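-- pv_equiv track=rewrite | github.com/tkt989/atcoder | abc156_d.py | modpow2
-- ===== SOURCE A (Python) =====
-- def modpow2(a, n, mod):
--   res = 1
--   while n > 0:
--     if n & 1:
--       res = res * a % mod
--     a = a * a % mod
--     n >>= 1
--   return res - 1
-- ===== SOURCE B (Python) =====
-- def _mp(a, n, mod):
--     if n <= 0:
--         return 1
--     half = _mp(a * a % mod, n // 2, mod)
--     return half * a % mod if n % 2 else half
--
-- def modpow2(a, n, mod):
--     return _mp(a, n, mod) - 1
-- ===== Notes on version B (the rewrite author's own statement) =====
-- stated objective: alternative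
-- what changed: Replaced A's iterative bit-scanning while loop with accumulator state (res, a, n) by a recursive divide-and-conquer square-and-multiply helper on the halved exponent, with the final -1 applied once in the wrapper.
import Mathlib
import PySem

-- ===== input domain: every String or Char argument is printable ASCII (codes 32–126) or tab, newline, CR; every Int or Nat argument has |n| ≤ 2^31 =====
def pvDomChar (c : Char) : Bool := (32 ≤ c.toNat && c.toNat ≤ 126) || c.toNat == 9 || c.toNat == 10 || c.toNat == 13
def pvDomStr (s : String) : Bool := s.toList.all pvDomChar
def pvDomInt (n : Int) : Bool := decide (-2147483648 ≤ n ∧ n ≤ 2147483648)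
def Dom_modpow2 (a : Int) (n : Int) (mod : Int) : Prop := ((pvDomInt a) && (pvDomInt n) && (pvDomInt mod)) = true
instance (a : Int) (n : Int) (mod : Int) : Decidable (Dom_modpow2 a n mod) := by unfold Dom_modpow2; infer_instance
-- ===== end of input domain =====

-- B replaces A's iterative bit-loop by a recursive divide-and-conquer square-and-multiply
-- helper, applying the final '-1' once in the wrapper (objective: alternative decomposition).

-- ===== PORT A =====
-- the while loop of A, state (res, a, n); n >>= 1 is n >>> 1
def modpow2Loop (res : Int) (a : Int) (n : Int) (mod : Int) : Int :=
  if 0 < n then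
    modpow2Loop
      (if PySem.Int.band n 1 ≠ 0 then PySem.Int.mod (res * a) mod else res)
      (PySem.Int.mod (a * a) mod) (n >>> (1 : Nat)) mod
  else res
termination_by n.toNat
decreasing_by simp [Int.shiftRight_eq_div_pow]; omega

def modpow2 (a : Int) (n : Int) (mod : Int) : Int :=
  modpow2Loop 1 a n mod - 1

-- ===== PORT B =====
-- recursive helper _mp of Source B
def mpB (a : Int) (n : Int) (mod : Int) : Int :=
  if n ≤ 0 then 1
  else
    let half := mpB (PySem.Int.mod (a * a) mod) (PySem.Int.floordiv n 2) mod
    if PySem.Int.mod n 2 ≠ 0 then PySem.Int.mod (half * a) mod else half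
termination_by n.toNat
decreasing_by
  rw [PySem.Int.floordiv_eq_ediv_of_pos (by norm_num)]; omega

def modpow2_alt (a : Int) (n : Int) (mod : Int) : Int :=
  mpB a n mod - 1

-- ===== PRECONDITION & SPEC =====
-- Pre_ excludes exactly the inputs where A (and B) raise ZeroDivisionError: mod = 0 with n > 0.
def Pre_modpow2 (a : Int) (n : Int) (mod : Int) : Prop := 0 < n → mod ≠ 0
instance (a : Int) (n : Int) (mod : Int) : Decidable (Pre_modpow2 a n mod) := by unfold Pre_modpow2; infer_instance
def pvWitness_modpow2 : Int × Int × Int := (2, 10, 1000)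

def Spec_modpow2 (a : Int) (n : Int) (mod : Int) (out : Int) : Prop := out = modpow2_alt a n mod
instance (a : Int) (n : Int) (mod : Int) (out : Int) : Decidable (Spec_modpow2 a n mod out) := by unfold Spec_modpow2; infer_instance

-- ===== CLAIM (what is proved, stated in full; the proofs are below) =====
def Claim_equal_modpow2 : Prop := ∀ (a : Int) (n : Int) (mod : Int), Dom_modpow2 a n mod → Pre_modpow2 a n mod → Spec_modpow2 a n mod (modpow2 a n mod)

-- ===== LEMMAS AND PROOFS =====

-- Python's floor mod only depends on the residue class of the dividend
theorem pymod_congr {m x y : Int} (hm : m ≠ 0) (h : m ∣ x - y) :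
    PySem.Int.mod x m = PySem.Int.mod y m := by
  have hx := PySem.Int.floordiv_mul_add_mod x m
  have hy := PySem.Int.floordiv_mul_add_mod y m
  have hd : m ∣ PySem.Int.mod x m - PySem.Int.mod y m := by
    obtain ⟨k, hk⟩ := h
    exact ⟨k - PySem.Int.floordiv x m + PySem.Int.floordiv y m, by linarith [hk]⟩
  have habs : |PySem.Int.mod x m - PySem.Int.mod y m| < |m| := by
    rcases lt_or_gt_of_ne hm with hneg | hpos
    · have bx := PySem.Int.mod_neg_bounds x hneg
      have by' := PySem.Int.mod_neg_bounds y hneg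
      rw [abs_of_neg hneg, abs_lt]; omega
    · have bx1 := PySem.Int.mod_nonneg x hpos
      have bx2 := PySem.Int.mod_lt x hpos
      have by1 := PySem.Int.mod_nonneg y hpos
      have by2 := PySem.Int.mod_lt y hpos
      rw [abs_of_pos hpos, abs_lt]; omega
  have := Int.eq_zero_of_abs_lt_dvd ((abs_dvd m _).mpr hd) habs
  omega

theorem pymod_mul_right (m x y : Int) (hm : m ≠ 0) :
    PySem.Int.mod (x * PySem.Int.mod y m) m = PySem.Int.mod (x * y) m := by
  apply pymod_congr hm
  have h := PySem.Int.floordiv_mul_add_mod y m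
  have hmod : PySem.Int.mod y m = y - PySem.Int.floordiv y m * m := by linarith
  exact ⟨-(x * PySem.Int.floordiv y m), by rw [hmod]; ring⟩

theorem pymod_mul_left (m x y : Int) (hm : m ≠ 0) :
    PySem.Int.mod (PySem.Int.mod x m * y) m = PySem.Int.mod (x * y) m := by
  rw [mul_comm, pymod_mul_right m y x hm, mul_comm]

theorem pymod_idem (m x : Int) (hm : m ≠ 0) :
    PySem.Int.mod (PySem.Int.mod x m) m = PySem.Int.mod x m := by
  have := pymod_mul_right m 1 x hm
  simpa using this

theorem shiftRight_one_eq_floordiv (n : Int) : n >>> (1 : Nat) = PySem.Int.floordiv n 2 := by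
  rw [PySem.Int.floordiv_eq_ediv_of_pos (by norm_num)]
  simp [Int.shiftRight_eq_div_pow]

-- for positive exponent the result of mpB is already reduced mod m
theorem mpB_reduced (mod : Int) (hm : mod ≠ 0) :
    ∀ (k : Nat) (n a : Int), n.toNat = k → 0 < n →
      PySem.Int.mod (mpB a n mod) mod = mpB a n mod := by
  intro k
  induction k using Nat.strong_induction_on with
  | _ k ih =>
    intro n a hk hn
    have hfd : PySem.Int.floordiv n 2 = n / 2 := PySem.Int.floordiv_eq_ediv_of_pos (by norm_num)
    have hm2 : PySem.Int.mod n 2 = n % 2 := PySem.Int.mod_eq_emod_of_pos (by norm_num)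
    rw [mpB, if_neg (by omega)]
    by_cases hodd : PySem.Int.mod n 2 ≠ 0
    · simp only [if_pos hodd]
      exact pymod_idem mod _ hm
    · simp only [if_neg hodd]
      simp only [ne_eq, not_not] at hodd
      rw [hm2] at hodd
      have hn2 : 0 < PySem.Int.floordiv n 2 := by rw [hfd]; omega
      have hlt : (PySem.Int.floordiv n 2).toNat < k := by rw [hfd]; omega
      exact ih _ hlt _ _ rfl hn2

-- main invariant: for n > 0 the loop computes res * mpB a n mod, reduced
theorem loop_eq_mpB (mod : Int) (hm : mod ≠ 0) :
    ∀ (k : Nat) (n res a : Int), n.toNat = k → 0 < n →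
      modpow2Loop res a n mod = PySem.Int.mod (res * mpB a n mod) mod := by
  intro k
  induction k using Nat.strong_induction_on with
  | _ k ih =>
    intro n res a hk hn
    have hband : PySem.Int.band n 1 = PySem.Int.mod n 2 := PySem.Int.band_one n
    have hdiv : n >>> (1 : Nat) = PySem.Int.floordiv n 2 := shiftRight_one_eq_floordiv n
    have hfd : PySem.Int.floordiv n 2 = n / 2 := PySem.Int.floordiv_eq_ediv_of_pos (by norm_num)
    have hm2 : PySem.Int.mod n 2 = n % 2 := PySem.Int.mod_eq_emod_of_pos (by norm_num)
    rw [modpow2Loop, if_pos hn, mpB]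
    simp only [if_neg (show ¬ n ≤ 0 from by omega), hband, hdiv]
    by_cases hz : 0 < PySem.Int.floordiv n 2
    · -- n ≥ 2: recurse on the halved exponent
      have hlt : (PySem.Int.floordiv n 2).toNat < k := by rw [hfd] at hz ⊢; omega
      rw [ih _ hlt _ _ _ rfl hz]
      by_cases hodd : PySem.Int.mod n 2 ≠ 0
      · simp only [if_pos hodd]
        rw [pymod_mul_left mod (res * a) _ hm, pymod_mul_right mod res _ hm]
        ring_nf
      · simp only [if_neg hodd]
    · -- n = 1: last iteration
      have h1 : n = 1 := by rw [hfd] at hz; omega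
      subst h1
      simp only [show PySem.Int.mod (1:Int) 2 = 1 from by decide,
        show PySem.Int.floordiv (1:Int) 2 = 0 from by decide,
        if_pos (show (1:Int) ≠ 0 from by decide)]
      rw [modpow2Loop, if_neg (show ¬ (0:Int) < 0 from by omega)]
      rw [mpB]
      simp only [if_pos (show (0:Int) ≤ 0 from le_refl 0), one_mul]
      rw [pymod_mul_right mod res a hm]

-- ===== VERDICT (by name: the statement is the Claim_ definition above) =====
theorem modpow2_spec : Claim_equal_modpow2 := by
  intro a n mod _ hpre
  unfold Spec_modpow2 modpow2 modpow2_alt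
  by_cases hn : 0 < n
  · have hm := hpre hn
    rw [loop_eq_mpB mod hm n.toNat n 1 a rfl hn, one_mul,
      mpB_reduced mod hm n.toNat n a rfl hn]
  · rw [modpow2Loop, if_neg hn, mpB, if_pos (by omega)]
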